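-- pv_equiv track=rewrite | github.com/organvm-iv-taxis/tool-interaction-design | conductor.py | resolve_organ_key
-- ===== SOURCE A (Python) =====
-- ORGANS: dict[str, dict[str, str]] = {
--     "I":    {"dir": "organvm-i-theoria",   "registry_key": "ORGAN-I",      "org": "ivviiviivvi"},
--     "II":   {"dir": "organvm-ii-poiesis",  "registry_key": "ORGAN-II",     "org": "omni-dromenon-machina"},
--     "III":  {"dir": "organvm-iii-ergon",    "registry_key": "ORGAN-III",    "org": "labores-profani-crux"},
--     "IV":   {"dir": "organvm-iv-taxis",     "registry_key": "ORGAN-IV",     "org": "organvm-iv-taxis"},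
--     "V":    {"dir": "organvm-v-logos",      "registry_key": "ORGAN-V",      "org": "organvm-v-logos"},
--     "VI":   {"dir": "organvm-vi-koinonia",  "registry_key": "ORGAN-VI",     "org": "organvm-vi-koinonia"},
--     "VII":  {"dir": "organvm-vii-kerygma",  "registry_key": "ORGAN-VII",    "org": "organvm-vii-kerygma"},
--     "META": {"dir": "meta-organvm",         "registry_key": "META-ORGANVM", "org": "meta-organvm"},
-- }
--
-- def resolve_organ_key(organ: str) -> str:
--     """Resolve shorthand (III, META) to registry key (ORGAN-III, META-ORGANVM)."""
--     organ = organ.upper().strip()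
--     if organ in ORGANS:
--         return ORGANS[organ]["registry_key"]
--     # Already a registry key?
--     for v in ORGANS.values():
--         if v["registry_key"] == organ:
--             return organ
--     return organ
-- ===== SOURCE B (Python) =====
-- _NUMERALS = ("I", "II", "III", "IV", "V", "VI", "VII")
--
-- def resolve_organ_key(organ: str) -> str:
--     """Resolve shorthand (III, META) to registry key (ORGAN-III, META-ORGANVM)."""
--     organ = organ.upper().strip()
--     if organ == "META":
--         return "META-ORGANVM"
--     if organ in _NUMERALS:
--         return "ORGAN-" + organ
--     return organ
-- ===== Notes on version B (the rewrite author's own statement) =====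
-- stated objective: simpler
-- what changed: B does not consult the ORGANS registry at all: it exploits the naming rule that each numeral shorthand's registry key is the fixed registry prefix joined to the numeral (with META the single irregular case) and CONSTRUCTS the answer by string concatenation after a membership test against the seven roman numerals, instead of A's dict lookup of a stored registry_key plus a linear scan over registry values.
import Mathlib
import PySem

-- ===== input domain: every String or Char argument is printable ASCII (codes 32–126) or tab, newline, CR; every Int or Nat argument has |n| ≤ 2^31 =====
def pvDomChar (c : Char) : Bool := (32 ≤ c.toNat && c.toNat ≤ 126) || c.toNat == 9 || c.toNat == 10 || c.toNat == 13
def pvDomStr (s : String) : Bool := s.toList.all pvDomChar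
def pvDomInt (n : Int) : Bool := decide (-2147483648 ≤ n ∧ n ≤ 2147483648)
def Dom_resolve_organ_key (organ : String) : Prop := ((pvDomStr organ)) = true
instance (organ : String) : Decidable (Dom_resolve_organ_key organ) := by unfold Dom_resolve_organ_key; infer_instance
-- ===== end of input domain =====

-- B constructs the registry key ("ORGAN-" + numeral, META irregular) instead of
-- looking it up in the registry dict (objective: simpler).


-- ===== PORT A =====
def ORGANS : PySem.Dict String (PySem.Dict String String) :=
  PySem.Dict.ofList [
    ("I",    PySem.Dict.ofList [("dir", "organvm-i-theoria"),   ("registry_key", "ORGAN-I"),      ("org", "ivviiviivvi")]),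
    ("II",   PySem.Dict.ofList [("dir", "organvm-ii-poiesis"),  ("registry_key", "ORGAN-II"),     ("org", "omni-dromenon-machina")]),
    ("III",  PySem.Dict.ofList [("dir", "organvm-iii-ergon"),   ("registry_key", "ORGAN-III"),    ("org", "labores-profani-crux")]),
    ("IV",   PySem.Dict.ofList [("dir", "organvm-iv-taxis"),    ("registry_key", "ORGAN-IV"),     ("org", "organvm-iv-taxis")]),
    ("V",    PySem.Dict.ofList [("dir", "organvm-v-logos"),     ("registry_key", "ORGAN-V"),      ("org", "organvm-v-logos")]),
    ("VI",   PySem.Dict.ofList [("dir", "organvm-vi-koinonia"), ("registry_key", "ORGAN-VI"),     ("org", "organvm-vi-koinonia")]),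
    ("VII",  PySem.Dict.ofList [("dir", "organvm-vii-kerygma"), ("registry_key", "ORGAN-VII"),    ("org", "organvm-vii-kerygma")]),
    ("META", PySem.Dict.ofList [("dir", "meta-organvm"),        ("registry_key", "META-ORGANVM"), ("org", "meta-organvm")])]

-- the 'for v in ORGANS.values(): if v["registry_key"] == organ: return organ' loop
def resolveLoop (vs : List (PySem.Dict String String)) (organ : String) : String :=
  match vs with
  | [] => organ
  | v :: rest => if v.getD "registry_key" "" == organ then organ else resolveLoop rest organ

def resolve_organ_key (organ : String) : String :=
  let organ := PySem.Str.strip (PySem.Str.upper organ)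
  if ORGANS.contains organ then
    (ORGANS.getD organ PySem.Dict.empty).getD "registry_key" ""
  else
    resolveLoop ORGANS.values organ

-- ===== PORT B =====
def pvNumerals : List String := ["I", "II", "III", "IV", "V", "VI", "VII"]

def resolve_organ_key_alt (organ : String) : String :=
  let organ := PySem.Str.strip (PySem.Str.upper organ)
  if organ == "META" then "META-ORGANVM"
  else if pvNumerals.contains organ then String.ofList ("ORGAN-".toList ++ organ.toList)
  else organ

-- ===== PRECONDITION & SPEC =====
def Spec_resolve_organ_key (organ : String) (out : String) : Prop := out = resolve_organ_key_alt organ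
instance (organ : String) (out : String) : Decidable (Spec_resolve_organ_key organ out) := by unfold Spec_resolve_organ_key; infer_instance

-- ===== CLAIM =====
def Claim_equal_resolve_organ_key : Prop := ∀ (organ : String), Dom_resolve_organ_key organ → Spec_resolve_organ_key organ (resolve_organ_key organ)

-- ===== LEMMAS AND PROOFS =====

-- The scan loop returns its argument whether or not a match is found.
lemma resolveLoop_eq (vs : List (PySem.Dict String String)) (s : String) :
    resolveLoop vs s = s := by
  induction vs with
  | nil => rfl
  | cons v rest ih => simp [resolveLoop, ih]

lemma core_eq (s : String) :
    (if ORGANS.contains s then (ORGANS.getD s PySem.Dict.empty).getD "registry_key" ""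
     else resolveLoop ORGANS.values s)
    = (if s == "META" then "META-ORGANVM"
       else if pvNumerals.contains s then String.ofList ("ORGAN-".toList ++ s.toList)
       else s) := by
  by_cases h1 : s = "I"; · subst h1; decide
  by_cases h2 : s = "II"; · subst h2; decide
  by_cases h3 : s = "III"; · subst h3; decide
  by_cases h4 : s = "IV"; · subst h4; decide
  by_cases h5 : s = "V"; · subst h5; decide
  by_cases h6 : s = "VI"; · subst h6; decide
  by_cases h7 : s = "VII"; · subst h7; decide
  by_cases h8 : s = "META"; · subst h8; decide
  have hk : ORGANS.keys = ["I", "II", "III", "IV", "V", "VI", "VII", "META"] := by decide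
  have hc : ORGANS.contains s = false := by
    rw [PySem.Dict.contains_eq_decide_mem_keys, hk]
    simp [h1, h2, h3, h4, h5, h6, h7, h8]
  have hn : s ∉ pvNumerals := by
    simp [pvNumerals, h1, h2, h3, h4, h5, h6, h7]
  rw [hc]
  simp [resolveLoop_eq, hn, h8]

-- ===== VERDICT =====
theorem resolve_organ_key_spec : Claim_equal_resolve_organ_key := by
  intro organ _
  unfold Spec_resolve_organ_key resolve_organ_key resolve_organ_key_alt
  exact core_eq _
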